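-- pv_equiv track=rewrite | github.com/Dave-Perkins/Fall-2020-CS-101 | project code/project 4/te.py | tupleAdd
-- ===== SOURCE A (Python) =====
-- def tupleAdd(tup1, tup2):
--     newTup = ()
--     if(len(tup1) >= len(tup2)):
--         for x in range(len(tup2)):
--             newTup += (tup1[x] + tup2[x],)
--         for x in range(len(tup2),len(tup1)):
--             newTup += (tup1[x],)
--         return newTup
--     else:
--         for x in range(len(tup1)):
--             newTup += (tup1[x] + tup2[x],)
--         for x in range(len(tup1),len(tup2)):
--             newTup += (tup2[x],)
--         return newTup
-- ===== SOURCE B (Python) =====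
-- def tupleAdd(tup1, tup2):
--     n = min(len(tup1), len(tup2))
--     return tuple(a + b for a, b in zip(tup1, tup2)) + tup1[n:] + tup2[n:]
-- ===== Notes on version B (the rewrite author's own statement) =====
-- stated objective: simpler
-- what changed: Drops A's length-comparison branch and its four index loops; B builds the common part with one zip and appends both slice tails (one is always empty) in a single symmetric expression.
import Mathlib
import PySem

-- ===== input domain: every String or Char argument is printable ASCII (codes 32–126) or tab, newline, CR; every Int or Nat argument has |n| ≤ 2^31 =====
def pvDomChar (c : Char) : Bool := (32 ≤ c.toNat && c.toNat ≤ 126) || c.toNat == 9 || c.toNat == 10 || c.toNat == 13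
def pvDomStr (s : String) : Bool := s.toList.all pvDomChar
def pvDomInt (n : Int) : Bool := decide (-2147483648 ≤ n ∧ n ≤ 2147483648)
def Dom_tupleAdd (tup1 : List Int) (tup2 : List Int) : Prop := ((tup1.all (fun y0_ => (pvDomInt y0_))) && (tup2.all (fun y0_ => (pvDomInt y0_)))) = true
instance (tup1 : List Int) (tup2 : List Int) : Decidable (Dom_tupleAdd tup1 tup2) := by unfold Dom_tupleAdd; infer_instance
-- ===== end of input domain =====

-- B removes A's length-comparison branch and four index loops: one zip for the common
-- part plus both slice tails (one always empty) — objective: simpler.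


-- ===== PORT A =====
-- Literal port: branch on len(tup1) >= len(tup2); in each branch two range-loops
-- append one element at a time (tuple += becomes acc ++ [·]).
def tupleAdd (tup1 : List Int) (tup2 : List Int) : List Int :=
  if tup1.length ≥ tup2.length then
    let newTup := (PySem.List.pyRange 0 tup2.length 1).foldl
      (fun acc x => acc ++ [PySem.List.pyGetD tup1 x 0 + PySem.List.pyGetD tup2 x 0]) []
    (PySem.List.pyRange tup2.length tup1.length 1).foldl
      (fun acc x => acc ++ [PySem.List.pyGetD tup1 x 0]) newTup
  else
    let newTup := (PySem.List.pyRange 0 tup1.length 1).foldl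
      (fun acc x => acc ++ [PySem.List.pyGetD tup1 x 0 + PySem.List.pyGetD tup2 x 0]) []
    (PySem.List.pyRange tup1.length tup2.length 1).foldl
      (fun acc x => acc ++ [PySem.List.pyGetD tup2 x 0]) newTup

-- ===== PORT B =====
-- zip(tup1, tup2) with + becomes zipWith, tup[n:] becomes PySem slice.
def tupleAdd_alt (tup1 : List Int) (tup2 : List Int) : List Int :=
  List.zipWith (· + ·) tup1 tup2
    ++ PySem.List.slice tup1 (some ((min tup1.length tup2.length : Nat) : Int)) none
    ++ PySem.List.slice tup2 (some ((min tup1.length tup2.length : Nat) : Int)) none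

-- ===== PRECONDITION & SPEC =====
def Spec_tupleAdd (tup1 : List Int) (tup2 : List Int) (out : List Int) : Prop := out = tupleAdd_alt tup1 tup2
instance (tup1 : List Int) (tup2 : List Int) (out : List Int) : Decidable (Spec_tupleAdd tup1 tup2 out) := by unfold Spec_tupleAdd; infer_instance

-- ===== CLAIM (what is proved, stated in full; the proofs are below) =====
def Claim_equal_tupleAdd : Prop := ∀ (tup1 : List Int) (tup2 : List Int), Dom_tupleAdd tup1 tup2 → Spec_tupleAdd tup1 tup2 (tupleAdd tup1 tup2)

-- ===== LEMMAS AND PROOFS =====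

-- A's elementwise append-loop is init ++ map.
theorem pv_foldl_map (l : List Int) (f : Int → Int) (init : List Int) :
    l.foldl (fun acc x => acc ++ [f x]) init = init ++ l.map f := by
  induction l generalizing init with
  | nil => simp
  | cons a t ih => simp [List.foldl, ih, List.append_assoc]

-- Mapping index-lookup over range(a, len xs) is drop a.
theorem pv_map_range_getD (xs : List Int) (a : Nat) (ha : a ≤ xs.length) :
    (PySem.List.pyRange (a : Int) (xs.length : Int) 1).map
      (fun x => PySem.List.pyGetD xs x 0) = xs.drop a := by
  rw [PySem.List.pyRange_one]
  apply List.ext_getElem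
  · simp only [List.length_map, List.length_range, List.length_drop]; omega
  · intro i h1 h2
    simp only [List.getElem_map, List.getElem_range, List.getElem_drop]
    have : ((a : Int) + ((i : Nat) : Int)) = (((a + i : Nat) : Int)) := by push_cast; ring
    rw [this, PySem.List.pyGetD_natCast]
    have hlt : a + i < xs.length := by
      simp at h2; omega
    simp [List.getD_eq_getElem?_getD, List.getElem?_eq_getElem hlt]

-- Mapping the sum of two index-lookups over range(0, min) is zipWith (+).
theorem pv_map_range_add (t1 t2 : List Int) (m : Nat) (hm : m = min t1.length t2.length) :
    (PySem.List.pyRange 0 (m : Int) 1).map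
      (fun x => PySem.List.pyGetD t1 x 0 + PySem.List.pyGetD t2 x 0)
      = List.zipWith (· + ·) t1 t2 := by
  rw [PySem.List.pyRange_one]
  apply List.ext_getElem
  · simp [hm]; omega
  · intro i h1 h2
    simp only [List.getElem_map, List.getElem_range, List.getElem_zipWith]
    have h1' : i < m := by simpa using h1
    have hi1 : i < t1.length := by omega
    have hi2 : i < t2.length := by omega
    have : ((0 : Int) + ((i : Nat) : Int)) = (((i : Nat) : Int)) := by ring
    rw [this, PySem.List.pyGetD_natCast, PySem.List.pyGetD_natCast]
    simp [List.getD_eq_getElem?_getD, List.getElem?_eq_getElem hi1, List.getElem?_eq_getElem hi2]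

-- ===== VERDICT (by name: the statement is the Claim_ definition above) =====
theorem tupleAdd_spec : Claim_equal_tupleAdd := by
  intro tup1 tup2 _
  unfold Spec_tupleAdd tupleAdd tupleAdd_alt
  rw [PySem.List.slice_from_natCast, PySem.List.slice_from_natCast]
  split_ifs with h
  · have hmin : min tup1.length tup2.length = tup2.length := by omega
    rw [pv_foldl_map, pv_foldl_map, List.nil_append,
        pv_map_range_add tup1 tup2 tup2.length (by omega),
        pv_map_range_getD tup1 tup2.length (by omega),
        hmin, List.drop_of_length_le (le_refl _)]
    simp
  · have hmin : min tup1.length tup2.length = tup1.length := by omega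
    rw [pv_foldl_map, pv_foldl_map, List.nil_append,
        pv_map_range_add tup1 tup2 tup1.length (by omega),
        pv_map_range_getD tup2 tup1.length (by omega),
        hmin, List.drop_of_length_le (le_refl _)]
    simp
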